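-- pv_equiv track=rewrite | github.com/vksubramanian73/othello-ai | symmetries.py | verticalReflection
-- ===== SOURCE A (Python) =====
-- def verticalReflection(board, width, height):
--     explodedStr = [*board]; counter = 0; tempIndices = []
--     for i in range(height-1, -1, -1):
--         for j in range(width*i, width*i+width):
--             tempIndices.append(j)
--     for i in tempIndices:
--         explodedStr[counter] = board[i]
--         counter += 1
--     return ''.join(explodedStr)
-- ===== SOURCE B (Python) =====
-- def verticalReflection(board, width, height):
--     if width <= 0 or height <= 0:
--         return board
--     rows = [board[r * width:(r + 1) * width] for r in range(height)]
--     return ''.join(reversed(rows)) + board[width * height:]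
-- ===== Notes on version B (the rewrite author's own statement) =====
-- stated objective: simpler
-- what changed: B slices the board into row strings, reverses the list of rows and joins them (plus the untouched tail), instead of A's building a per-cell index permutation table and copying characters one by one through a counter.
import Mathlib
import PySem

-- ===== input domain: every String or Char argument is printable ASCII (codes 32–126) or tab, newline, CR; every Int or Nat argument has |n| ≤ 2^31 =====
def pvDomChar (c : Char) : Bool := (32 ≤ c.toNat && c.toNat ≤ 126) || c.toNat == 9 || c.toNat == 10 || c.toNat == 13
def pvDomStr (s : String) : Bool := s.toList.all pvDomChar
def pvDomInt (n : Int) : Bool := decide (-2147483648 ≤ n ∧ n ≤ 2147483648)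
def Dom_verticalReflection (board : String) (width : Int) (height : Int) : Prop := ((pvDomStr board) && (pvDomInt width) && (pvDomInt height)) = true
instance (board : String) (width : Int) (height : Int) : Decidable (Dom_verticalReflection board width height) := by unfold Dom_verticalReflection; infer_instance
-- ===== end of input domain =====

-- B replaces A's per-cell index table and copy loop with slice-rows / reverse / join (objective: simpler).

-- ===== PORT A =====
-- literal transliteration of A: build tempIndices, then overwrite explodedStr in place
def verticalReflection (board : String) (width : Int) (height : Int) : String :=
  let explodedStr := board.toList
  let tempIndices : List Int :=
    (PySem.List.pyRange (height - 1) (-1) (-1)).foldl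
      (fun acc i =>
        (PySem.List.pyRange (width * i) (width * i + width) 1).foldl
          (fun a j => a ++ [j]) acc) []
  let final :=
    tempIndices.foldl
      (fun (st : List Char × Nat) i =>
        (st.1.set st.2 (PySem.List.pyGetD board.toList i ' '), st.2 + 1))
      (explodedStr, 0)
  String.ofList final.1

-- ===== PORT B =====
-- literal transliteration of B: row slices, reversed, joined, plus the tail slice
def verticalReflection_alt (board : String) (width : Int) (height : Int) : String :=
  if width ≤ 0 ∨ height ≤ 0 then board
  else
    let rows : List (List Char) :=
      (PySem.List.pyRange 0 height 1).map
        (fun r => PySem.List.slice board.toList (some (r * width)) (some ((r + 1) * width)))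
    String.ofList (rows.reverse.flatten ++ PySem.List.slice board.toList (some (width * height)) none)

-- ===== PRECONDITION & SPEC =====
-- Pre_ excludes exactly the inputs where A raises IndexError: positive dimensions with a board shorter than width*height.
def Pre_verticalReflection (board : String) (width : Int) (height : Int) : Prop :=
  0 < width → 0 < height → width * height ≤ (board.toList.length : Int)
instance (board : String) (width : Int) (height : Int) : Decidable (Pre_verticalReflection board width height) := by unfold Pre_verticalReflection; infer_instance

def pvWitness_verticalReflection : String × Int × Int := ("abcdef", 2, 3)

def Spec_verticalReflection (board : String) (width : Int) (height : Int) (out : String) : Prop := out = verticalReflection_alt board width height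
instance (board : String) (width : Int) (height : Int) (out : String) : Decidable (Spec_verticalReflection board width height out) := by unfold Spec_verticalReflection; infer_instance

-- ===== CLAIM (what is proved, stated in full; the proofs are below) =====
def Claim_equal_verticalReflection : Prop := ∀ (board : String) (width : Int) (height : Int), Dom_verticalReflection board width height → Pre_verticalReflection board width height → Spec_verticalReflection board width height (verticalReflection board width height)

-- ===== LEMMAS AND PROOFS =====

-- The write loop of A: overwriting positions c, c+1, … with g applied to the index list
theorem pv_writes (g : Int → Char) (I : List Int) (cs : List Char) (c : Nat)
    (h : c + I.length ≤ cs.length) :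
    (I.foldl (fun (st : List Char × Nat) i => (st.1.set st.2 (g i), st.2 + 1)) (cs, c)).1
      = cs.take c ++ I.map g ++ cs.drop (c + I.length) := by
  induction I generalizing cs c with
  | nil => simp
  | cons i I ih =>
    simp only [List.foldl_cons, List.map_cons, List.length_cons]
    rw [ih (cs.set c (g i)) (c + 1) (by simp at h ⊢; omega)]
    have hc : c < cs.length := by simp at h; omega
    have h1 : (cs.set c (g i)).take (c + 1) = cs.take c ++ [g i] := by
      rw [List.set_eq_take_append_cons_drop]
      rw [if_pos hc, List.take_append]
      simp [List.take_of_length_le, List.length_take, Nat.min_eq_left (Nat.le_of_lt hc)]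
    have h2 : (cs.set c (g i)).drop (c + 1 + I.length) = cs.drop (c + 1 + I.length) := by
      rw [List.drop_set_of_lt (by omega)]
    rw [h1, h2]
    have h3 : c + 1 + I.length = c + (I.length + 1) := by omega
    rw [h3]
    simp [List.append_assoc]

-- a row of pyGetD's is a drop/take chunk
theorem pv_row (L : List Char) (d : Char) (a : Int) (k : Nat)
    (ha : 0 ≤ a) (hk : a + k ≤ (L.length : Int)) :
    (PySem.List.pyRange a (a + k) 1).map (fun j => PySem.List.pyGetD L j d)
      = (L.drop a.toNat).take k := by
  induction k with
  | zero => simp [PySem.List.pyRange_one_eq_nil]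
  | succ k ih =>
    have h1 : (a : Int) + (k + 1 : Nat) = (a + k) + 1 := by push_cast; ring
    rw [h1, PySem.List.pyRange_one_succ_right (by omega)]
    rw [List.map_append, ih (by push_cast at hk ⊢; omega)]
    have hlt : a.toNat + k < L.length := by push_cast at hk; omega
    have : PySem.List.pyGetD L (a + (k : Int)) d = L[a.toNat + k]'(by omega) := by
      rw [PySem.List.pyGetD_eq_getElem L d (by omega) (by omega)]
      congr 1
      omega
    simp only [List.map_cons, List.map_nil, this]
    rw [List.take_add_one]
    congr 1
    rw [List.getElem?_drop]
    rw [List.getElem?_eq_getElem (by omega)]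
    rfl

theorem verticalReflection_spec : Claim_equal_verticalReflection := by
  intro board width height _hdom hpre
  unfold Spec_verticalReflection verticalReflection verticalReflection_alt
  by_cases hdeg : width ≤ 0 ∨ height ≤ 0
  · -- degenerate: tempIndices = [], A returns board unchanged
    simp only [if_pos hdeg]
    have hTI : (PySem.List.pyRange (height - 1) (-1) (-1)).foldl
        (fun acc i => (PySem.List.pyRange (width * i) (width * i + width) 1).foldl
          (fun a j => a ++ [j]) acc) [] = ([] : List Int) := by
      rcases hdeg with hw | hh
      · have : ∀ (l : List Int), l.foldl
            (fun acc i => (PySem.List.pyRange (width * i) (width * i + width) 1).foldl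
              (fun a j => a ++ [j]) acc) [] = [] := by
          intro l
          induction l with
          | nil => rfl
          | cons x xs ih =>
            simp only [List.foldl_cons]
            rw [PySem.List.pyRange_one_eq_nil (by omega)]
            exact ih
        exact this _
      · rw [PySem.List.pyRange_neg_one_eq_nil (by omega)]
        rfl
    rw [hTI]
    simp [List.foldl_nil]
  · rw [not_or] at hdeg
    have hw : 0 < width := by omega
    have hh : 0 < height := by omega
    simp only [if_neg (by omega : ¬ (width ≤ 0 ∨ height ≤ 0))]
    have hlen : width * height ≤ (board.toList.length : Int) := hpre hw hh
    set L := board.toList with hL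
    -- tempIndices as a flatMap over the countdown range
    have hTI : (PySem.List.pyRange (height - 1) (-1) (-1)).foldl
        (fun acc i => (PySem.List.pyRange (width * i) (width * i + width) 1).foldl
          (fun a j => a ++ [j]) acc) []
        = (PySem.List.pyRange (height - 1) (-1) (-1)).flatMap
            (fun i => PySem.List.pyRange (width * i) (width * i + width) 1) := by
      have hinner : ∀ (acc : List Int) (i : Int),
          (PySem.List.pyRange (width * i) (width * i + width) 1).foldl
            (fun a j => a ++ [j]) acc
          = acc ++ PySem.List.pyRange (width * i) (width * i + width) 1 := by
        intro acc i
        have : ∀ (l acc : List Int), l.foldl (fun a j => a ++ [j]) acc = acc ++ l := by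
          intro l
          induction l with
          | nil => simp
          | cons x xs ih => intro acc; simp [ih]
        exact this _ acc
      simp only [hinner]
      have : ∀ (l : List Int) (acc : List Int), l.foldl (fun acc i => acc ++
          PySem.List.pyRange (width * i) (width * i + width) 1) acc
          = acc ++ l.flatMap (fun i => PySem.List.pyRange (width * i) (width * i + width) 1) := by
        intro l
        induction l with
        | nil => simp
        | cons x xs ih => intro acc; simp [ih, List.append_assoc]
      simpa using this _ []
    rw [hTI]
    set TI := (PySem.List.pyRange (height - 1) (-1) (-1)).flatMap
        (fun i => PySem.List.pyRange (width * i) (width * i + width) 1) with hTIdef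
    -- length of tempIndices
    have hrowlen : ∀ i : Int, (PySem.List.pyRange (width * i) (width * i + width) 1).length
        = width.toNat := by
      intro i
      rw [PySem.List.length_pyRange_one]
      congr 1; omega
    have hTIlen : TI.length = width.toNat * height.toNat := by
      rw [hTIdef, List.length_flatMap]
      rw [List.map_congr_left (fun i _ => hrowlen i)]
      rw [List.map_const', List.sum_replicate, PySem.List.length_pyRange_neg_one]
      have : (height - 1 - (-1)).toNat = height.toNat := by omega
      rw [this, smul_eq_mul, Nat.mul_comm]
    have hnat : width.toNat * height.toNat ≤ L.length := by
      have : (width.toNat : Int) * (height.toNat : Int) ≤ (L.length : Int) := by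
        rw [Int.toNat_of_nonneg (by omega), Int.toNat_of_nonneg (by omega)]; exact hlen
      exact_mod_cast this
    rw [pv_writes _ TI L 0 (by omega)]
    simp only [List.take_zero, List.nil_append, Nat.zero_add, hTIlen]
    -- map over the flatMap = reversed rows
    have hrow_eq : ∀ i : Int, 0 ≤ i → i < height →
        (PySem.List.pyRange (width * i) (width * i + width) 1).map
            (fun j => PySem.List.pyGetD L j ' ')
          = PySem.List.slice L (some (i * width)) (some ((i + 1) * width)) := by
      intro i hi0 hih
      have hrow := pv_row L ' ' (width * i) width.toNat
        (by positivity) (by rw [Int.toNat_of_nonneg (by omega)]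
                            calc width * i + width = width * (i + 1) := by ring
                              _ ≤ width * height := by
                                  apply mul_le_mul_of_nonneg_left (by omega) (by omega)
                              _ ≤ (L.length : Int) := hlen)
      rw [Int.toNat_of_nonneg (by omega)] at hrow
      rw [hrow]
      rw [PySem.List.slice_toNat _ (by positivity) (by positivity), mul_comm width i]
      congr 1
      have h4 : (i + 1) * width = i * width + width := by ring
      have hiw : 0 ≤ i * width := by positivity
      rw [h4]
      omega
    have he : height - 1 + 1 = height := by ring
    have hz : (-1 : Int) + 1 = 0 := by norm_num
    have hmap : TI.map (fun j => PySem.List.pyGetD L j ' ')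
        = ((PySem.List.pyRange 0 height 1).map
            (fun r => PySem.List.slice L (some (r * width)) (some ((r + 1) * width)))).reverse.flatten := by
      calc TI.map (fun j => PySem.List.pyGetD L j ' ')
          = ((PySem.List.pyRange (height - 1) (-1) (-1)).map
              (fun i => (PySem.List.pyRange (width * i) (width * i + width) 1).map
                (fun j => PySem.List.pyGetD L j ' '))).flatten := by
            rw [hTIdef, List.map_flatMap, List.flatMap_def]
        _ = ((PySem.List.pyRange (height - 1) (-1) (-1)).map
              (fun i => PySem.List.slice L (some (i * width)) (some ((i + 1) * width)))).flatten := by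
            congr 1
            apply List.map_congr_left
            intro i hi
            rw [PySem.List.mem_pyRange_neg_one] at hi
            exact hrow_eq i (by omega) (by omega)
        _ = _ := by
            rw [PySem.List.pyRange_neg_one_eq_reverse, he, hz, List.map_reverse]
    rw [hmap]
    -- tail
    have htail : L.drop (width.toNat * height.toNat)
        = PySem.List.slice L (some (width * height)) none := by
      rw [PySem.List.slice_from _ (by positivity)]
      have hwh : ((width.toNat * height.toNat : Nat) : Int) = width * height := by
        push_cast [Int.toNat_of_nonneg (le_of_lt hw), Int.toNat_of_nonneg (le_of_lt hh)]
        ring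
      congr 1
      omega
    rw [htail]
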